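-- pv_equiv track=rewrite | github.com/eklownr/PythonEC | lecture 14/exercise.py | grades_dict
-- ===== SOURCE A (Python) =====
-- score_and_grade = {
--     90: "A",
--     80: "B",
--     70: "C",
--     60: "D",
--     50: "E",
--     0: "F"
-- }
--
-- def grades_dict(scores):
--     score_and_count = {
--         "A":[],
--         "B":[],
--         "C":[],
--         "D":[],
--         "E":[],
--         "F":[]
--     }
--
--     for score in scores:
--         for grade in score_and_grade.keys():
--             if score >= grade:
--                 score_and_count[score_and_grade[grade]].append(score)
--                 break
--
--     return score_and_count
-- ===== SOURCE B (Python) =====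
-- def grades_dict(scores):
--     buckets = {g: [] for g in "ABCDEF"}
--     table = "FFFFFEDCBA"
--     for s in scores:
--         if s >= 0:
--             buckets[table[min(s // 10, 9)]].append(s)
--     return buckets
-- ===== Notes on version B (the rewrite author's own statement) =====
-- stated objective: simpler
-- what changed: Replaces the per-score scan over the six grade thresholds with a direct arithmetic lookup: bucket letter = 'FFFFFEDCBA'[min(score // 10, 9)], keeping A's behaviour of dropping negative scores.
import Mathlib
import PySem

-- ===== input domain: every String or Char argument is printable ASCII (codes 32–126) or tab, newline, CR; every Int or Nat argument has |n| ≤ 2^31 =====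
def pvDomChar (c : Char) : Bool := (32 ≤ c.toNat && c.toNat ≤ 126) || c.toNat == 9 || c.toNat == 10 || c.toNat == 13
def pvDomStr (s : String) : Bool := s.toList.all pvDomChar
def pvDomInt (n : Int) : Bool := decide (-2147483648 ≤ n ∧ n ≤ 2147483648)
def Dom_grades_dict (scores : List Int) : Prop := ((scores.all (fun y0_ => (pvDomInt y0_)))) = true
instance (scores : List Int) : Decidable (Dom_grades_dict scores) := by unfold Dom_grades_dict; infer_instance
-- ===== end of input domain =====

-- B replaces A's per-score scan over the six grade thresholds with a direct arithmetic table lookup (simpler).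

-- ===== PORT A =====
def scoreAndGrade : List (Int × String) := [(90,"A"),(80,"B"),(70,"C"),(60,"D"),(50,"E"),(0,"F")]

-- inner loop: 'for grade in score_and_grade.keys(): if score >= grade: append; break'
def gradesInner (score : Int) (d : PySem.Dict String (List Int)) : List (Int × String) → PySem.Dict String (List Int)
  | [] => d
  | (g, letterS) :: rest =>
      if score ≥ g then d.modify letterS [] (fun l => l ++ [score])
      else gradesInner score d rest

def grades_dict (scores : List Int) : List (String × List Int) :=
  let init : PySem.Dict String (List Int) :=
    PySem.Dict.ofList [("A",[]),("B",[]),("C",[]),("D",[]),("E",[]),("F",[])]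
  (scores.foldl (fun d s => gradesInner s d scoreAndGrade) init).items

-- ===== PORT B =====
def gradesTable : List Char := "FFFFFEDCBA".toList

def grades_dict_alt (scores : List Int) : List (String × List Int) :=
  let buckets : PySem.Dict String (List Int) :=
    "ABCDEF".toList.foldl (fun d g => d.insert (String.ofList [g]) []) PySem.Dict.empty
  (scores.foldl (fun d s =>
      if s ≥ 0 then
        d.modify (String.ofList [(PySem.List.pyGet? gradesTable (min (PySem.Int.floordiv s 10) 9)).getD 'F'])
          [] (fun l => l ++ [s])
      else d) buckets).items

-- ===== PRECONDITION & SPEC =====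
def Spec_grades_dict (scores : List Int) (out : List (String × List Int)) : Prop := out = grades_dict_alt scores
instance (scores : List Int) (out : List (String × List Int)) : Decidable (Spec_grades_dict scores out) := by unfold Spec_grades_dict; infer_instance

-- ===== CLAIM (what is proved, stated in full; the proofs are below) =====
def Claim_equal_grades_dict : Prop := ∀ (scores : List Int), Dom_grades_dict scores → Spec_grades_dict scores (grades_dict scores)

-- ===== LEMMAS AND PROOFS =====

theorem fd_eq (s q : Int) (h1 : q * 10 ≤ s) (h2 : s < (q+1) * 10) : PySem.Int.floordiv s 10 = q :=
  (PySem.Int.floordiv_eq_iff_of_pos (by omega)).mpr ⟨h1, h2⟩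

-- the two per-score step functions agree on every dict
theorem grades_step_eq (s : Int) (d : PySem.Dict String (List Int)) :
    gradesInner s d scoreAndGrade =
      (if s ≥ 0 then
        d.modify (String.ofList [(PySem.List.pyGet? gradesTable (min (PySem.Int.floordiv s 10) 9)).getD 'F'])
          [] (fun l => l ++ [s])
      else d) := by
  by_cases h90 : s ≥ 90
  · have hm : min (PySem.Int.floordiv s 10) 9 = 9 := by
      have : (9:Int) ≤ PySem.Int.floordiv s 10 := (PySem.Int.le_floordiv_iff_mul_le (by omega)).mpr (by omega)
      omega
    rw [if_pos (by omega : s ≥ 0), hm]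
    simp [gradesInner, scoreAndGrade, h90, gradesTable, PySem.List.pyGet?, PySem.List.pyIdx?]
  by_cases h80 : s ≥ 80
  · have hm : min (PySem.Int.floordiv s 10) 9 = 8 := by rw [fd_eq s 8 (by omega) (by omega)]; decide
    rw [if_pos (by omega : s ≥ 0), hm]
    simp [gradesInner, scoreAndGrade, h90, h80, gradesTable, PySem.List.pyGet?, PySem.List.pyIdx?]
  by_cases h70 : s ≥ 70
  · have hm : min (PySem.Int.floordiv s 10) 9 = 7 := by rw [fd_eq s 7 (by omega) (by omega)]; decide
    rw [if_pos (by omega : s ≥ 0), hm]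
    simp [gradesInner, scoreAndGrade, h90, h80, h70, gradesTable, PySem.List.pyGet?, PySem.List.pyIdx?]
  by_cases h60 : s ≥ 60
  · have hm : min (PySem.Int.floordiv s 10) 9 = 6 := by rw [fd_eq s 6 (by omega) (by omega)]; decide
    rw [if_pos (by omega : s ≥ 0), hm]
    simp [gradesInner, scoreAndGrade, h90, h80, h70, h60, gradesTable, PySem.List.pyGet?, PySem.List.pyIdx?]
  by_cases h50 : s ≥ 50
  · have hm : min (PySem.Int.floordiv s 10) 9 = 5 := by rw [fd_eq s 5 (by omega) (by omega)]; decide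
    rw [if_pos (by omega : s ≥ 0), hm]
    simp [gradesInner, scoreAndGrade, h90, h80, h70, h60, h50, gradesTable, PySem.List.pyGet?, PySem.List.pyIdx?]
  by_cases h0 : s ≥ 0
  · have hq : PySem.Int.floordiv s 10 = 0 ∨ PySem.Int.floordiv s 10 = 1 ∨ PySem.Int.floordiv s 10 = 2 ∨
        PySem.Int.floordiv s 10 = 3 ∨ PySem.Int.floordiv s 10 = 4 := by
      rcases (by omega : 0*10 ≤ s ∧ s < 1*10 ∨ 1*10 ≤ s ∧ s < 2*10 ∨ 2*10 ≤ s ∧ s < 3*10 ∨ 3*10 ≤ s ∧ s < 4*10 ∨ 4*10 ≤ s ∧ s < 5*10) with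
        ⟨a,b⟩|⟨a,b⟩|⟨a,b⟩|⟨a,b⟩|⟨a,b⟩
      · exact Or.inl (fd_eq s 0 a b)
      · exact Or.inr (Or.inl (fd_eq s 1 a b))
      · exact Or.inr (Or.inr (Or.inl (fd_eq s 2 a b)))
      · exact Or.inr (Or.inr (Or.inr (Or.inl (fd_eq s 3 a b))))
      · exact Or.inr (Or.inr (Or.inr (Or.inr (fd_eq s 4 a b))))
    rw [if_pos h0]
    rcases hq with h|h|h|h|h <;> rw [h] <;>
      simp [gradesInner, scoreAndGrade, h90, h80, h70, h60, h50, h0, gradesTable, PySem.List.pyGet?, PySem.List.pyIdx?]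
  · rw [if_neg h0]
    simp [gradesInner, scoreAndGrade, h90, h80, h70, h60, h50, h0]

theorem grades_fold_eq (scores : List Int) (d : PySem.Dict String (List Int)) :
    scores.foldl (fun d s => gradesInner s d scoreAndGrade) d =
      scores.foldl (fun d s =>
        if s ≥ 0 then
          d.modify (String.ofList [(PySem.List.pyGet? gradesTable (min (PySem.Int.floordiv s 10) 9)).getD 'F'])
            [] (fun l => l ++ [s])
        else d) d := by
  induction scores generalizing d with
  | nil => rfl
  | cons x xs ih => simp only [List.foldl_cons, grades_step_eq]

-- ===== VERDICT (by name: the statement is the Claim_ definition above) =====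
theorem grades_dict_spec : Claim_equal_grades_dict := by
  intro scores _
  show (_ : List (String × List Int)) = _
  simp only [grades_dict, grades_dict_alt, grades_fold_eq]
  rfl
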